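-- pv_equiv track=rewrite | github.com/qszy1210/skills | table-structure-detector/scripts/table_structure_detector.py | _split_by_separators
-- ===== SOURCE A (Python) =====
-- def _split_by_separators(
--     min_row: int, max_row: int, separators: set[int]
-- ) -> list[tuple[int, int]]:
--     """按分隔行将行范围分割成多个段"""
--     segments = []
--     cur_start = min_row
--
--     for r in range(min_row, max_row + 1):
--         if r in separators:
--             if cur_start < r:
--                 segments.append((cur_start, r - 1))
--             cur_start = r + 1
--
--     if cur_start <= max_row:
--         segments.append((cur_start, max_row))
--
--     return segments
-- ===== SOURCE B (Python) =====
-- def _split_by_separators(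
--     min_row: int, max_row: int, separators: set[int]
-- ) -> list[tuple[int, int]]:
--     bounds = [min_row - 1] + sorted(s for s in separators if min_row <= s <= max_row) + [max_row + 1]
--     return [(a + 1, b - 1) for a, b in zip(bounds, bounds[1:]) if a + 1 <= b - 1]
-- ===== Notes on version B (the rewrite author's own statement) =====
-- stated objective: alternative
-- what changed: Instead of scanning every row in range(min_row, max_row+1) with an accumulator state, B builds a sorted boundary list (min_row-1, the in-range separators, max_row+1) and emits the non-empty gap between each consecutive boundary pair via zip, with no running state.
import Mathlib
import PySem

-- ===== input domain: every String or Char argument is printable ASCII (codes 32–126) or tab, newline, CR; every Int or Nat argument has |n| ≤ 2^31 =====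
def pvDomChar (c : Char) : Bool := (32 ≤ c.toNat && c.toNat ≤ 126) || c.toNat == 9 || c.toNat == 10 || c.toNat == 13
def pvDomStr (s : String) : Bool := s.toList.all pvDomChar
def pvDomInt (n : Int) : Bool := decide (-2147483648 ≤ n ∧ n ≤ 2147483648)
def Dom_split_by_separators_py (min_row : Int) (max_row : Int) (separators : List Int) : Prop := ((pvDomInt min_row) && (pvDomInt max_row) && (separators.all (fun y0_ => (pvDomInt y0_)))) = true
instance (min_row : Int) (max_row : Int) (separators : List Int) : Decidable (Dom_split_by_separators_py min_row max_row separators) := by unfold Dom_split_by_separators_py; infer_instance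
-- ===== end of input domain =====

-- B replaces A's stateful scan of every row in [min_row, max_row] by building the sorted boundary
-- list (min_row-1, in-range separators, max_row+1) and mapping each consecutive boundary pair to its
-- non-empty gap (objective: alternative algorithm, same observable result).


-- ===== PORT A =====
def split_by_separators_py (min_row : Int) (max_row : Int) (separators : List Int) : List (Int × Int) :=
  let st := (PySem.List.pyRange min_row (max_row + 1) 1).foldl
    (fun (st : List (Int × Int) × Int) r =>
      if r ∈ separators then
        ((if st.2 < r then st.1 ++ [(st.2, r - 1)] else st.1), r + 1)
      else st) ([], min_row)
  if st.2 ≤ max_row then st.1 ++ [(st.2, max_row)] else st.1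

-- ===== PORT B =====
def split_by_separators_py_alt (min_row : Int) (max_row : Int) (separators : List Int) : List (Int × Int) :=
  let bounds := (min_row - 1) :: PySem.List.sorted (separators.filter (fun s => decide (min_row ≤ s) && decide (s ≤ max_row))) (fun x => x) false ++ [max_row + 1]
  ((bounds.zip bounds.tail).filter (fun p => decide (p.1 + 1 ≤ p.2 - 1))).map (fun p => (p.1 + 1, p.2 - 1))

-- ===== PRECONDITION & SPEC =====
-- separators is a Python set: its List representation holds DISTINCT elements (type convention);
-- Pre_ states that representation invariant, nothing else.
def Pre_split_by_separators_py (min_row : Int) (max_row : Int) (separators : List Int) : Prop :=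
  separators.Nodup
instance (min_row : Int) (max_row : Int) (separators : List Int) : Decidable (Pre_split_by_separators_py min_row max_row separators) := by unfold Pre_split_by_separators_py; infer_instance

def pvWitness_split_by_separators_py : Int × Int × List Int := (0, 9, [3, 7])

def Spec_split_by_separators_py (min_row : Int) (max_row : Int) (separators : List Int) (out : List (Int × Int)) : Prop := out = split_by_separators_py_alt min_row max_row separators
instance (min_row : Int) (max_row : Int) (separators : List Int) (out : List (Int × Int)) : Decidable (Spec_split_by_separators_py min_row max_row separators out) := by unfold Spec_split_by_separators_py; infer_instance

-- ===== CLAIM (what is proved, stated in full; the proofs are below) =====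
def Claim_equal_split_by_separators_py : Prop := ∀ (min_row : Int) (max_row : Int) (separators : List Int), Dom_split_by_separators_py min_row max_row separators → Pre_split_by_separators_py min_row max_row separators → Spec_split_by_separators_py min_row max_row separators (split_by_separators_py min_row max_row separators)

-- ===== LEMMAS AND PROOFS =====

-- Folding a step guarded by membership over a list = folding the unguarded step over the filtered list.
theorem foldl_guard_filter {α β : Type} (p : α → Bool) (f : β → α → β) :
    ∀ (l : List α) (init : β),
      l.foldl (fun st r => if p r then f st r else st) init = (l.filter p).foldl f init := by
  intro l
  induction l with
  | nil => intro init; simp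
  | cons a t ih =>
    intro init
    by_cases h : p a = true
    · simp [List.filter_cons, h, ih]
    · simp [List.filter_cons, h, ih]

-- The separators within the range, sorted, are exactly the in-range rows that are separators.
theorem sorted_filter_eq_range_filter (min_row max_row : Int) (separators : List Int)
    (hnd : separators.Nodup) :
    PySem.List.sorted (separators.filter (fun s => decide (min_row ≤ s) && decide (s ≤ max_row))) (fun x => x) false
      = (PySem.List.pyRange min_row (max_row + 1) 1).filter (fun r => decide (r ∈ separators)) := by
  apply PySem.List.sorted_eq_of_perm_of_pairwise_lt
  · rw [List.perm_ext_iff_of_nodup]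
    · intro x
      simp [PySem.List.mem_pyRange_one]
      tauto
    · exact (PySem.List.nodup_pyRange_one min_row (max_row + 1)).filter _
    · exact hnd.filter _
  · exact (PySem.List.pairwise_lt_pyRange_one min_row (max_row + 1)).filter _

-- Proof-only helper naming A's final flush step.
def pvFlush (mx : Int) (st : List (Int × Int) × Int) : List (Int × Int) :=
  if st.2 ≤ mx then st.1 ++ [(st.2, mx)] else st.1

-- A's accumulator loop over any separator list, followed by the final flush, equals B's
-- boundary-pair gap emission over the same list (no ordering assumption needed).
theorem fold_flush_eq_gaps (mx : Int) :
    ∀ (seps : List Int) (cur : Int) (segs : List (Int × Int)),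
      pvFlush mx
        (seps.foldl
          (fun (st : List (Int × Int) × Int) s =>
            ((if st.2 < s then st.1 ++ [(st.2, s - 1)] else st.1), s + 1)) (segs, cur))
      = segs ++
          (((((cur - 1) :: seps ++ [mx + 1]).zip (((cur - 1) :: seps ++ [mx + 1]).tail)).filter
              (fun p => decide (p.1 + 1 ≤ p.2 - 1))).map (fun p => (p.1 + 1, p.2 - 1))) := by
  intro seps
  induction seps with
  | nil =>
    intro cur segs
    by_cases h : cur ≤ mx
    · simp [pvFlush, List.zip, List.zipWith, h, show cur - 1 + 1 = cur by ring]
    · simp [pvFlush, List.zip, List.zipWith, h]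
  | cons s t ih =>
    intro cur segs
    have htail : ((cur - 1) :: (s :: t) ++ [mx + 1]).zip (((cur - 1) :: (s :: t) ++ [mx + 1]).tail)
        = (cur - 1, s) :: ((s :: t ++ [mx + 1]).zip ((s :: t ++ [mx + 1]).tail)) := by
      cases t <;> simp [List.zip, List.zipWith]
    simp only [List.foldl_cons]
    rw [ih (s + 1) _]
    by_cases h : cur < s
    · rw [htail]
      simp [List.filter_cons, show (cur - 1 + 1 ≤ s - 1) ↔ (cur < s) by omega, h,
        show cur - 1 + 1 = cur by ring, show s + 1 - 1 = s by ring]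
    · rw [htail]
      simp [List.filter_cons, show (cur - 1 + 1 ≤ s - 1) ↔ (cur < s) by omega, h,
        show s + 1 - 1 = s by ring]

-- ===== VERDICT (by name: the statement is the Claim_ definition above) =====
theorem split_by_separators_py_spec : Claim_equal_split_by_separators_py := by
  intro min_row max_row separators _ hpre
  unfold Spec_split_by_separators_py split_by_separators_py split_by_separators_py_alt
  have h1 := foldl_guard_filter (fun r => decide (r ∈ separators))
      (fun (st : List (Int × Int) × Int) r =>
        ((if st.2 < r then st.1 ++ [(st.2, r - 1)] else st.1), r + 1))
      (PySem.List.pyRange min_row (max_row + 1) 1) ([], min_row)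
  have h2 := sorted_filter_eq_range_filter min_row max_row separators hpre
  simp only [decide_eq_true_eq] at h1
  simp only [h1, ← h2]
  have h3 := fold_flush_eq_gaps max_row
      (PySem.List.sorted (separators.filter (fun s => decide (min_row ≤ s) && decide (s ≤ max_row))) (fun x => x) false)
      min_row []
  simpa [pvFlush, show min_row - 1 + 1 = min_row by ring] using h3
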